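-- pv_equiv track=rewrite | github.com/cdccnleo/RQA2025 | scripts/comprehensive_syntax_fix.py | _fix_function_definitions
-- ===== SOURCE A (Python) =====
-- def _fix_function_definitions(content: str) -> str:
--     """修复函数定义错误"""
--     # 修复函数定义的缩进问题
--     lines = content.split('\n')
--     for i, line in enumerate(lines):
--         if line.strip().startswith('def ') and not line.startswith('    ') and i > 0:
--             # 如果前面有class定义，这应该是方法
--             prev_lines = [l.strip() for l in lines[max(0, i-5):i] if l.strip()]
--             if any('class ' in l for l in prev_lines):
--                 lines[i] = '    ' + line.lstrip()
--
--     return '\n'.join(lines)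
-- ===== SOURCE B (Python) =====
-- def _fix_function_definitions(content: str) -> str:
--     """Single streaming pass: instead of rescanning a 5-line window per def line,
--     carry the index of the most recent line whose stripped text contains 'class '
--     and indent a top-level def line iff that index is within the last 5 lines."""
--     out = []
--     last_class = None
--     for i, line in enumerate(content.split('\n')):
--         stripped = line.strip()
--         if (stripped.startswith('def ') and not line.startswith('    ') and i > 0
--                 and last_class is not None and i - last_class <= 5):
--             line = '    ' + line.lstrip()
--         if 'class ' in stripped:
--             last_class = i
--         out.append(line)
--     return '\n'.join(out)
-- ===== Notes on version B (the rewrite author's own statement) =====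
-- stated objective: alternative
-- what changed: A's pass that edits the line list in place and, for each unindented def line, re-strips and rescans a 5-line look-back window is replaced by a single streaming pass with an O(1) accumulator: carry the index of the most recent line whose stripped text contains the class-keyword marker, and indent a def line iff that index is within the last 5 lines (correct because the window contains such a line iff the latest one is at most 5 back, and re-indenting never changes a line's stripped text).
import Mathlib
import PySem

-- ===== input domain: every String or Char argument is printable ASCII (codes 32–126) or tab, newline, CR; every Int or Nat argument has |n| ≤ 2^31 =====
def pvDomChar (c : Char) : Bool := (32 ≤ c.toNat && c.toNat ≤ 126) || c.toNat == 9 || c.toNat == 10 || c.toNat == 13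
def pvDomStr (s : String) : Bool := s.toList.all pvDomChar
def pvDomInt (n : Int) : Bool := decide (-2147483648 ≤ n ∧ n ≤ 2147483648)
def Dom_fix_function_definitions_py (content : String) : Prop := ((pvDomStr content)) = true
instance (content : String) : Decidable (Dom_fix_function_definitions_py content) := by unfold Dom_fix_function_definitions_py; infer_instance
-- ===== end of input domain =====

-- B replaces A's pass that edits the line list in place and re-strips a 5-line window per def line
-- by a single streaming pass carrying the index of the most recent 'class ' line (objective: alternative).

-- ===== PORT A =====
-- one loop iteration of A: possibly re-indent line i after looking back 5 lines in the (mutated) list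
def pvStepA (st : List (List Char)) (p : Int × List Char) : List (List Char) :=
  let i := p.1
  let line := p.2
  if PySem.Chars.startswith (PySem.Chars.strip line) "def ".toList
      && !(PySem.Chars.startswith line "    ".toList) && decide (0 < i) then
    let prev := ((PySem.List.slice st (some (max 0 (i - 5))) (some i)).map PySem.Chars.strip).filter
      (fun l => !l.isEmpty)
    if prev.any (fun l => PySem.Chars.isIn "class ".toList l) then
      st.set i.toNat ("    ".toList ++ PySem.Chars.lstrip line)
    else st
  else st

def fix_function_definitions_py (content : String) : String :=
  let lines := PySem.Chars.splitOn content.toList "\n".toList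
  String.ofList (PySem.Chars.join "\n".toList
    ((PySem.List.enumerate lines 0).foldl pvStepA lines))

-- ===== PORT B =====
-- 'last_class is not None and i - last_class <= 5'
def pvLast5 (lc : Option Int) (i : Int) : Bool :=
  match lc with
  | some j => decide (i - j ≤ 5)
  | none => false

-- one iteration of B's streaming loop; state = (last_class, out)
def pvStepB (st : Option Int × List (List Char)) (p : Int × List Char) : Option Int × List (List Char) :=
  let i := p.1
  let line := p.2
  let stripped := PySem.Chars.strip line
  let line' :=
    if PySem.Chars.startswith stripped "def ".toList
        && !(PySem.Chars.startswith line "    ".toList) && decide (0 < i)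
        && pvLast5 st.1 i then
      "    ".toList ++ PySem.Chars.lstrip line
    else line
  let lc := if PySem.Chars.isIn "class ".toList stripped then some i else st.1
  (lc, st.2 ++ [line'])

def fix_function_definitions_py_alt (content : String) : String :=
  let lines := PySem.Chars.splitOn content.toList "\n".toList
  String.ofList (PySem.Chars.join "\n".toList
    ((PySem.List.enumerate lines 0).foldl pvStepB (none, [])).2)

-- ===== PRECONDITION & SPEC =====
def Spec_fix_function_definitions_py (content : String) (out : String) : Prop := out = fix_function_definitions_py_alt content
instance (content : String) (out : String) : Decidable (Spec_fix_function_definitions_py content out) := by unfold Spec_fix_function_definitions_py; infer_instance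

-- ===== CLAIM (what is proved, stated in full; the proofs are below) =====
def Claim_equal_fix_function_definitions_py : Prop := ∀ (content : String), Dom_fix_function_definitions_py content → Spec_fix_function_definitions_py content (fix_function_definitions_py content)

-- ===== LEMMAS AND PROOFS =====

-- proof-side spec: does line m of the original list contain 'class ' after stripping?
def pvClassAt (L : List (List Char)) (m : Nat) : Bool :=
  PySem.Chars.isIn "class ".toList (PySem.Chars.strip (L.getD m []))

-- proof-side spec of the 5-line look-back test for line k
def pvWin (L : List (List Char)) (k : Nat) : Bool :=
  decide (∃ m, m < k ∧ k ≤ m + 5 ∧ pvClassAt L m = true)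

-- proof-side spec of the result for line k
def pvLineF (L : List (List Char)) (k : Nat) (line : List Char) : List Char :=
  if PySem.Chars.startswith (PySem.Chars.strip line) "def ".toList
      && !(PySem.Chars.startswith line "    ".toList) && decide (0 < k) && pvWin L k then
    "    ".toList ++ PySem.Chars.lstrip line
  else line

def pvM (L : List (List Char)) : List (List Char) :=
  (PySem.List.enumerate L 0).map (fun p => pvLineF L p.1.toNat p.2)

-- index of the last 'class ' line among lines 0..k-1
def pvLC (L : List (List Char)) : Nat → Option Nat
  | 0 => none
  | k + 1 => if pvClassAt L k then some k else pvLC L k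

def pvLCi (L : List (List Char)) (k : Nat) : Option Int :=
  Option.map (fun j : Nat => (j : Int)) (pvLC L k)

-- re-indenting a line does not change its strip
theorem pvStrip_indent (l : List Char) :
    PySem.Chars.strip ("    ".toList ++ PySem.Chars.lstrip l) = PySem.Chars.strip l := by
  have hsp : PySem.Chars.isspace ' ' = true := by decide
  simp [PySem.Chars.strip, PySem.Chars.lstrip, PySem.Chars.rstrip, hsp,
    List.dropWhile_idempotent]

theorem pvStripLineF (L : List (List Char)) (k : Nat) (line : List Char) :
    PySem.Chars.strip (pvLineF L k line) = PySem.Chars.strip line := by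
  rw [pvLineF]
  split
  · exact pvStrip_indent line
  · rfl

-- a line containing 'class ' is nonempty
theorem pvIsIn_ne_nil (l : List Char) (h : PySem.Chars.isIn "class ".toList l = true) :
    l.isEmpty = false := by
  rw [PySem.Chars.isIn_iff_infix] at h
  have := h.sublist.length_le
  simp at this ⊢
  intro hl; subst hl; simp at this

theorem pvGetD_set (l : List (List Char)) (i j : Nat) (v : List Char) (hj : i ≠ j) :
    (l.set i v).getD j [] = l.getD j [] := by
  rw [List.getD_eq_getElem?_getD, List.getD_eq_getElem?_getD, List.getElem?_set, if_neg hj]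

-- A's look-back test over the mutated list equals the spec window test over the original list
theorem pvAny_eq (L st : List (List Char)) (k : Nat) (hk : k < L.length)
    (h1 : st.length = L.length)
    (h2 : ∀ j, j < L.length → PySem.Chars.strip (st.getD j []) = PySem.Chars.strip (L.getD j [])) :
    (((PySem.List.slice st (some (max 0 ((k : Int) - 5))) (some (k : Int))).map PySem.Chars.strip).filter
        (fun l => !l.isEmpty)).any (fun l => PySem.Chars.isIn "class ".toList l)
      = pvWin L k := by
  have hmax : max 0 ((k : Int) - 5) = ((k - 5 : Nat) : Int) := by omega
  rw [hmax, PySem.List.slice_natCast]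
  set a := k - 5 with ha
  have hak : a ≤ k := by omega
  rw [Bool.eq_iff_iff, pvWin]
  simp only [List.any_eq_true, List.mem_filter, List.mem_map, decide_eq_true_eq]
  constructor
  · rintro ⟨l, ⟨⟨y, hy, rfl⟩, hne⟩, hcl⟩
    rw [List.mem_iff_getElem] at hy
    obtain ⟨t, ht, rfl⟩ := hy
    have htlen : t < k - a := by
      have h' := ht
      simp only [List.length_take, List.length_drop, h1] at h'
      omega
    have hget : (List.take (k - a) (List.drop a st))[t]'ht = st[a + t]'(by omega) := by
      simp [List.getElem_take, List.getElem_drop]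
    refine ⟨a + t, by omega, by omega, ?_⟩
    rw [pvClassAt, ← h2 (a + t) (by omega)]
    rw [List.getD_eq_getElem _ _ (by omega : a + t < st.length)]
    rw [← hget]; exact hcl
  · rintro ⟨m, hmk, hm5, hc⟩
    have ham : a ≤ m := by omega
    have hms : m < st.length := by omega
    have hlt : m - a < (List.take (k - a) (List.drop a st)).length := by
      simp [List.length_take, List.length_drop, h1]; omega
    have hcl : PySem.Chars.isIn "class ".toList (PySem.Chars.strip (st[m]'hms)) = true := by
      rw [← List.getD_eq_getElem st [] hms, h2 m (by omega)]
      exact hc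
    refine ⟨PySem.Chars.strip (st[m]'hms),
      ⟨⟨(List.take (k - a) (List.drop a st))[m - a]'hlt, List.getElem_mem _, ?_⟩, ?_⟩, hcl⟩
    · congr 1
      simp [List.getElem_take, List.getElem_drop]
      congr 1
      omega
    · simp only [Bool.not_eq_eq_eq_not, Bool.not_true]
      exact pvIsIn_ne_nil _ hcl

-- one A-step is a pointwise set to the spec value for that line
theorem pvStep_eq (L st : List (List Char)) (k : Nat) (hk : k < L.length)
    (h1 : st.length = L.length)
    (h2 : ∀ j, j < L.length → PySem.Chars.strip (st.getD j []) = PySem.Chars.strip (L.getD j []))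
    (hkk : st.getD k [] = L.getD k []) :
    pvStepA st ((k : Int), L.getD k []) = st.set k (pvLineF L k (L.getD k [])) := by
  have hks : k < st.length := by omega
  have hself : st.set k (L.getD k []) = st := by
    rw [← hkk, List.getD_eq_getElem st [] hks, List.set_getElem_self]
  have hany := pvAny_eq L st k hk h1 h2
  have hself' : st.set k (L[k]?.getD []) = st := by simpa using hself
  have h0 : decide (0 < (k : Int)) = decide (0 < k) := by simp
  simp only [pvStepA, pvLineF]
  rw [hany, h0]
  cases hcv : (PySem.Chars.startswith (PySem.Chars.strip (L.getD k [])) "def ".toList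
      && !(PySem.Chars.startswith (L.getD k []) "    ".toList) && decide (0 < k)) with
  | false =>
    simp
    exact hself'.symm
  | true =>
    cases hw : pvWin L k with
    | false =>
      simp
      exact hself'.symm
    | true => simp [Int.toNat_natCast]

-- past the end, A's fold is over and the spec tail is empty
theorem pvBase (L st : List (List Char)) (k : Nat) (hk : L.length ≤ k)
    (h1 : st.length = L.length) :
    (PySem.List.enumerate (L.drop k) (k : Int)).foldl pvStepA st
      = st.take k ++ ((pvM L).drop k) := by
  rw [List.drop_eq_nil_of_le hk, PySem.List.enumerate_nil, List.foldl_nil,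
    List.take_of_length_le (by omega),
    List.drop_eq_nil_of_le (by simp [pvM, PySem.List.length_enumerate]; omega), List.append_nil]

-- the A-side loop invariant: A's remaining fold finishes the spec list
theorem pvMain (L : List (List Char)) (n : Nat) :
    ∀ (k : Nat) (st : List (List Char)), L.length ≤ k + n →
    st.length = L.length →
    (∀ j, j < L.length → PySem.Chars.strip (st.getD j []) = PySem.Chars.strip (L.getD j [])) →
    (∀ j, k ≤ j → st.getD j [] = L.getD j []) →
    (PySem.List.enumerate (L.drop k) (k : Int)).foldl pvStepA st
      = st.take k ++ ((pvM L).drop k) := by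
  induction n with
  | zero =>
    intro k st hle h1 h2 h3
    exact pvBase L st k (by omega) h1
  | succ n ih =>
    intro k st hle h1 h2 h3
    by_cases hkc : L.length ≤ k
    · exact pvBase L st k hkc h1
    · have hk : k < L.length := Nat.lt_of_not_le hkc
      have hgd : L[k] = L.getD k [] := (List.getD_eq_getElem _ _ hk).symm
      rw [List.drop_eq_getElem_cons hk, PySem.List.enumerate_cons, List.foldl_cons, hgd,
        pvStep_eq L st k hk h1 h2 (h3 k le_rfl)]
      have hks : k < st.length := by omega
      set v := pvLineF L k (L.getD k []) with hv
      have hst' : st.set k v = st.take k ++ v :: st.drop (k + 1) := by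
        rw [List.set_eq_take_append_cons_drop, if_pos hks]
      have hcast : ((k : Int) + 1) = ((k + 1 : Nat) : Int) := by push_cast; ring
      have hlen' : (st.set k v).length = L.length := by simp [h1]
      have hle' : L.length ≤ (k + 1) + n := by omega
      have h2' : ∀ j, j < L.length →
          PySem.Chars.strip ((st.set k v).getD j []) = PySem.Chars.strip (L.getD j []) := by
        intro j hj
        by_cases hjk : k = j
        · subst hjk
          rw [List.getD_eq_getElem _ _ (by simpa using hks), List.getElem_set_self (by omega)]
          exact pvStripLineF L k (L.getD k [])
        · rw [pvGetD_set _ _ _ _ hjk]; exact h2 j hj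
      have h3' : ∀ j, k + 1 ≤ j → (st.set k v).getD j [] = L.getD j [] := by
        intro j hj
        rw [pvGetD_set _ _ _ _ (by omega)]; exact h3 j (by omega)
      rw [hcast, ih (k + 1) (st.set k v) hle' hlen' h2' h3']
      have hMlen : (pvM L).length = L.length := by simp [pvM, PySem.List.length_enumerate]
      have hMk : k < (pvM L).length := by omega
      have hMget : (pvM L)[k]'hMk = v := by
        simp only [pvM, List.getElem_map]
        rw [PySem.List.getElem_enumerate _ _ _ (by simp [PySem.List.length_enumerate]; omega)]
        simp [hv, List.getElem?_eq_getElem hk]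
      have htk : (st.take k ++ v :: st.drop (k + 1)).take (k + 1) = st.take k ++ [v] := by
        have hlt : (st.take k).length = k := by simp; omega
        rw [List.take_append, List.take_of_length_le (by omega), hlt]
        simp
      rw [List.drop_eq_getElem_cons hMk, hMget, hst', htk, List.append_assoc]
      simp

-- last-class index: none means no class line before k
theorem pvLC_none (L : List (List Char)) (k : Nat) (h : pvLC L k = none) :
    ∀ m, m < k → pvClassAt L m = false := by
  induction k with
  | zero => intro m hm; omega
  | succ k ih =>
    rw [pvLC] at h
    split at h
    · exact absurd h (by simp)
    · rename_i hck
      intro m hm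
      by_cases hmk : m = k
      · subst hmk; simpa using hck
      · exact ih h m (by omega)

-- last-class index: some j means j is the largest class line below k
theorem pvLC_some (L : List (List Char)) (k : Nat) (j : Nat) (h : pvLC L k = some j) :
    j < k ∧ pvClassAt L j = true ∧ ∀ m, j < m → m < k → pvClassAt L m = false := by
  induction k with
  | zero => rw [pvLC] at h; exact absurd h (by simp)
  | succ k ih =>
    rw [pvLC] at h
    split at h
    · rename_i hck
      obtain rfl : k = j := by simpa using h
      exact ⟨by omega, hck, by omega⟩
    · rename_i hck
      obtain ⟨h1, h2, h3⟩ := ih h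
      refine ⟨by omega, h2, ?_⟩
      intro m hm1 hm2
      by_cases hmk : m = k
      · subst hmk; simpa using hck
      · exact h3 m hm1 (by omega)

-- B's guard over the carried last-class index equals the spec window test
theorem pvGuard_eq (L : List (List Char)) (k : Nat) :
    pvLast5 (pvLCi L k) (k : Int) = pvWin L k := by
  rw [Bool.eq_iff_iff, pvWin]
  cases h : pvLC L k with
  | none =>
    have hni : pvLCi L k = none := by rw [pvLCi, h]; rfl
    rw [hni]
    simp only [pvLast5, decide_eq_true_eq]
    constructor
    · intro hf; exact absurd hf (by simp)
    · rintro ⟨m, hm, _, hc⟩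
      rw [pvLC_none L k h m hm] at hc; exact absurd hc (by simp)
  | some j =>
    obtain ⟨hjk, hcj, hmax⟩ := pvLC_some L k j h
    have hsi : pvLCi L k = some ((j : Nat) : Int) := by rw [pvLCi, h]; rfl
    rw [hsi]
    simp only [pvLast5, decide_eq_true_eq]
    constructor
    · intro h5
      exact ⟨j, hjk, by omega, hcj⟩
    · rintro ⟨m, hm, hm5, hc⟩
      have hmj : m ≤ j := by
        by_contra hmj
        rw [hmax m (by omega) hm] at hc; exact absurd hc (by simp)
      omega

-- the B-side loop invariant: the fold from state (pvLC k, acc) appends the spec tail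
theorem pvMainB (L : List (List Char)) (n : Nat) :
    ∀ (k : Nat) (acc : List (List Char)), L.length ≤ k + n →
    ((PySem.List.enumerate (L.drop k) (k : Int)).foldl pvStepB (pvLCi L k, acc)).2
      = acc ++ ((pvM L).drop k) := by
  induction n with
  | zero =>
    intro k acc hle
    rw [List.drop_eq_nil_of_le (by omega), PySem.List.enumerate_nil, List.foldl_nil,
      List.drop_eq_nil_of_le (by simp [pvM, PySem.List.length_enumerate]; omega), List.append_nil]
  | succ n ih =>
    intro k acc hle
    by_cases hkc : L.length ≤ k
    · rw [List.drop_eq_nil_of_le hkc, PySem.List.enumerate_nil, List.foldl_nil,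
        List.drop_eq_nil_of_le (by simp [pvM, PySem.List.length_enumerate]; omega), List.append_nil]
    · have hk : k < L.length := Nat.lt_of_not_le hkc
      have hgd : L[k] = L.getD k [] := (List.getD_eq_getElem _ _ hk).symm
      rw [List.drop_eq_getElem_cons hk, PySem.List.enumerate_cons, List.foldl_cons, hgd]
      have h0 : decide (0 < (k : Int)) = decide (0 < k) := by simp
      have hstep : pvStepB (pvLCi L k, acc) ((k : Int), L.getD k [])
          = (pvLCi L (k + 1), acc ++ [pvLineF L k (L.getD k [])]) := by
        simp only [pvStepB, Prod.mk.injEq]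
        constructor
        · -- last_class update
          have hlci : pvLCi L (k + 1)
              = Option.map (fun j : Nat => (j : Int)) (if pvClassAt L k then some k else pvLC L k) := rfl
          rw [pvLCi, hlci]
          by_cases hc : pvClassAt L k = true
          · rw [if_pos (show PySem.Chars.isIn "class ".toList (PySem.Chars.strip (L.getD k [])) = true from hc),
              if_pos hc]
            rfl
          · rw [if_neg (show ¬ PySem.Chars.isIn "class ".toList (PySem.Chars.strip (L.getD k [])) = true from hc),
              if_neg hc]
        · -- emitted line
          congr 1
          rw [pvLineF, pvGuard_eq, h0]
      rw [hstep]
      have hcast : ((k : Int) + 1) = ((k + 1 : Nat) : Int) := by push_cast; ring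
      rw [hcast, ih (k + 1) _ (by omega)]
      have hMlen : (pvM L).length = L.length := by simp [pvM, PySem.List.length_enumerate]
      have hMk : k < (pvM L).length := by omega
      have hMget : (pvM L)[k]'hMk = pvLineF L k (L.getD k []) := by
        simp only [pvM, List.getElem_map]
        rw [PySem.List.getElem_enumerate _ _ _ (by simp [PySem.List.length_enumerate]; omega)]
        simp [List.getElem?_eq_getElem hk]
      rw [List.drop_eq_getElem_cons hMk, hMget, List.append_assoc]
      simp

-- ===== VERDICT (by name: the statement is the Claim_ definition above) =====
theorem fix_function_definitions_py_spec : Claim_equal_fix_function_definitions_py := by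
  intro content _
  unfold Spec_fix_function_definitions_py fix_function_definitions_py fix_function_definitions_py_alt
  set L := PySem.Chars.splitOn content.toList "\n".toList with hL
  have hA := pvMain L L.length 0 L (by omega) rfl (fun j _ => rfl) (fun j _ => rfl)
  have hB := pvMainB L L.length 0 [] (by omega)
  rw [show pvLCi L 0 = (none : Option Int) from rfl] at hB
  simp only [List.drop_zero, Nat.cast_zero, List.take_zero, List.nil_append] at hA hB
  dsimp only
  rw [hA, hB]
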